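-- pv_equiv track=rewrite | github.com/Linoliumer/game_Cipher | game_Cipher-main/gameCipher/resource_files/number_system.py | xForTen
-- ===== SOURCE A (Python) =====
-- def xForTen(num, x1 = 2): #Перевод из двоичной СС в десятитичную.
-- 	number = num
-- 	step = 0
-- 	sum_elem =0
-- 	len_num = len(str(number)) - 1
-- 	while step <= len_num:
-- 		elem = number % 10
-- 		oper = elem * (x1 ** step)
-- 		sum_elem += oper
-- 		step += 1
-- 		elem1 = number // 10
-- 		number = elem1
-- 	return sum_elem
-- ===== SOURCE B (Python) =====
-- def xForTen(num, x1=2):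
--     # collect least-significant-first digits, same count as A's loop
--     number = num
--     digits = []
--     for _ in range(len(str(number))):
--         digits.append(number % 10)
--         number //= 10
--     # Horner: most-significant first, acc = acc*x1 + d
--     acc = 0
--     for d in reversed(digits):
--         acc = acc * x1 + d
--     return acc
-- ===== Notes on version B (the rewrite author's own statement) =====
-- stated objective: alternative
-- what changed: B collects the digits once and evaluates with Horner's method (acc = acc*x1 + d over the digits most-significant first) instead of A's per-step power x1**step multiply-and-sum.
import Mathlib
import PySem

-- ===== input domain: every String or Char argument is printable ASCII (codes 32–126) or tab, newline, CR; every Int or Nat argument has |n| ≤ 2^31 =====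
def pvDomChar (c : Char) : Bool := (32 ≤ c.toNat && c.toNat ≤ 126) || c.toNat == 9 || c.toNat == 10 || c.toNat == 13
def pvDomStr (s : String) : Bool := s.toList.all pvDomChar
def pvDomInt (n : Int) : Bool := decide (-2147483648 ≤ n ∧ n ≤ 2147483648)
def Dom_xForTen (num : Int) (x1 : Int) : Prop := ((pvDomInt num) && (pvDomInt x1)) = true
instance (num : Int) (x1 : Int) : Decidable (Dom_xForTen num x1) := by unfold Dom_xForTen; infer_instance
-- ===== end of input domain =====

-- B: one-pass Horner evaluation of the same digit sequence instead of A's per-step power sum (objective: alternative algorithm).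
-- ===== PORT A =====
-- while step <= len_num: sum_elem += (number % 10) * x1**step; step += 1; number //= 10
def xForTenLoop (fuel : Nat) (number : Int) (step : Nat) (sum_elem : Int) (x1 : Int) : Int :=
  match fuel with
  | 0 => sum_elem
  | f+1 =>
    let elem := PySem.Int.mod number 10
    let oper := elem * x1 ^ step
    xForTenLoop f (PySem.Int.floordiv number 10) (step + 1) (sum_elem + oper) x1

def xForTen (num : Int) (x1 : Int) : Int :=
  -- len_num = len(str(number)) - 1; the while loop runs len(str(number)) times
  xForTenLoop (PySem.Int.toStr num).toList.length num 0 0 x1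

-- ===== PORT B =====
-- first loop of Source B: build the least-significant-first digit list
def xForTenDigits (fuel : Nat) (number : Int) : List Int :=
  match fuel with
  | 0 => []
  | f+1 => PySem.Int.mod number 10 :: xForTenDigits f (PySem.Int.floordiv number 10)

def xForTen_alt (num : Int) (x1 : Int) : Int :=
  let digits := xForTenDigits (PySem.Int.toStr num).toList.length num
  -- second loop: for d in reversed(digits): acc = acc*x1 + d
  digits.reverse.foldl (fun acc d => acc * x1 + d) 0

-- ===== PRECONDITION & SPEC =====
def Spec_xForTen (num : Int) (x1 : Int) (out : Int) : Prop := out = xForTen_alt num x1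
instance (num : Int) (x1 : Int) (out : Int) : Decidable (Spec_xForTen num x1 out) := by unfold Spec_xForTen; infer_instance

-- ===== CLAIM (what is proved, stated in full; the proofs are below) =====
def Claim_equal_xForTen : Prop := ∀ (num : Int) (x1 : Int), Dom_xForTen num x1 → Spec_xForTen num x1 (xForTen num x1)

-- ===== LEMMAS AND PROOFS =====

-- ===== VERDICT (by name: the statement is the Claim_ definition above) =====
-- value of a lsb-first digit list
def digitsVal (x1 : Int) : List Int → Int
  | [] => 0
  | d :: t => d + x1 * digitsVal x1 t

theorem horner_eq_digitsVal (x1 : Int) (ds : List Int) :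
    ds.reverse.foldl (fun acc d => acc * x1 + d) 0 = digitsVal x1 ds := by
  induction ds with
  | nil => rfl
  | cons d t ih =>
    simp only [List.reverse_cons, List.foldl_append, List.foldl_cons, List.foldl_nil, digitsVal, ih]
    ring

theorem loop_eq_digitsVal (fuel : Nat) (number : Int) (step : Nat) (s x1 : Int) :
    xForTenLoop fuel number step s x1
      = s + x1 ^ step * digitsVal x1 (xForTenDigits fuel number) := by
  induction fuel generalizing number step s with
  | zero => simp [xForTenLoop, xForTenDigits, digitsVal]
  | succ f ih =>
    simp only [xForTenLoop, xForTenDigits, digitsVal, ih]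
    ring

theorem xForTen_spec : Claim_equal_xForTen := by
  intro num x1 _
  unfold Spec_xForTen xForTen xForTen_alt
  rw [horner_eq_digitsVal, loop_eq_digitsVal]
  ring
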